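-- pv_equiv track=rewrite | github.com/kanngji/thisisCodingTest | 프로그래머스/lv0/46.py | solution
-- ===== SOURCE A (Python) =====
-- def solution(hp):
--     answer = 0
--     attack=[5,3,1]
--     i=0
--     while hp!=0:
--         answer+=hp//attack[i]
--         hp=hp%attack[i]
--
--         i+=1
--     return answer
-- ===== SOURCE B (Python) =====
-- def solution(hp):
--     # One divmod by 5, then a precomputed table for the attack count of the
--     # remainder r in 0..4 (minimal attacks using 3 and 1): no loop, no trial division.
--     REM_COST = (0, 1, 2, 1, 2)
--     q, r = divmod(hp, 5)
--     return q + REM_COST[r]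
-- ===== Notes on version B (the rewrite author's own statement) =====
-- stated objective: alternative
-- what changed: Replaced the greedy division loop over the attack list [5,3,1] with a single divmod by 5 plus a precomputed 5-entry lookup table giving the attack count for each remainder, eliminating the loop and the divisions by 3 and 1 entirely.
import Mathlib
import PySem

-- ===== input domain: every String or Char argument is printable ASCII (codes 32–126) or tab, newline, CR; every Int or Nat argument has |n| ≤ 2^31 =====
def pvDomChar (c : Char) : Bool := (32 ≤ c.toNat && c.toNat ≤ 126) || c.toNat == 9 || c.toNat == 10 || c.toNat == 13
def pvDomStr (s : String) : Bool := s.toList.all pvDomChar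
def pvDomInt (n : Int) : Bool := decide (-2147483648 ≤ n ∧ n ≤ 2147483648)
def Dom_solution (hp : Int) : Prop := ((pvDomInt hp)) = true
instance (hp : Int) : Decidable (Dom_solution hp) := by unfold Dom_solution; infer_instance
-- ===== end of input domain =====

-- B replaces A's greedy division loop over [5,3,1] with one divmod by 5 and a 5-entry
-- remainder-cost lookup table (objective: alternative; same constant cost).

-- ===== PORT A =====
-- the while-loop: i advances one index of attack per iteration, so it is recursion on the
-- remaining suffix of the attack list; an exhausted list with hp ≠ 0 would be Python's
-- IndexError, unreachable for integer hp since hp % 1 = 0.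
def solutionLoop (hp answer : Int) : List Int → Int
  | [] => answer
  | a :: rest =>
    if hp = 0 then answer
    else solutionLoop (PySem.Int.mod hp a) (answer + PySem.Int.floordiv hp a) rest

def solution (hp : Int) : Int := solutionLoop hp 0 [5, 3, 1]

-- ===== PORT B =====
-- REM_COST[r] with 0 ≤ r = hp % 5 < 5 is always in range, so the none branch of
-- pyGet? (Python's IndexError) is unreachable; the 0 default is never used.
def solution_alt (hp : Int) : Int :=
  match PySem.Int.divmod? hp 5 with
  | none => 0  -- unreachable: divisor 5 ≠ 0
  | some (q, r) => q + (PySem.List.pyGet? [(0 : Int), 1, 2, 1, 2] r).getD 0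

-- ===== PRECONDITION & SPEC =====
def Spec_solution (hp : Int) (out : Int) : Prop := out = solution_alt hp
instance (hp : Int) (out : Int) : Decidable (Spec_solution hp out) := by unfold Spec_solution; infer_instance

-- ===== CLAIM (what is proved, stated in full; the proofs are below) =====
def Claim_equal_solution : Prop := ∀ (hp : Int), Dom_solution hp → Spec_solution hp (solution hp)

-- ===== LEMMAS AND PROOFS =====

-- ===== VERDICT (by name: the statement is the Claim_ definition above) =====
theorem solution_spec : Claim_equal_solution := by
  intro hp _
  unfold Spec_solution solution solution_alt
  have hdm : PySem.Int.divmod? hp 5 = some (hp / 5, hp % 5) := by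
    simp only [PySem.Int.divmod?]
    norm_num [Int.fdiv_eq_ediv, Int.fmod_eq_emod]
  rw [hdm]
  simp only [solutionLoop,
    show PySem.Int.mod hp 5 = hp % 5 from PySem.Int.mod_eq_emod_of_pos (by norm_num),
    show ∀ a : Int, PySem.Int.mod a 3 = a % 3 from fun a => PySem.Int.mod_eq_emod_of_pos (by norm_num),
    show PySem.Int.floordiv hp 5 = hp / 5 from PySem.Int.floordiv_eq_ediv_of_pos (by norm_num),
    show ∀ a : Int, PySem.Int.floordiv a 3 = a / 3 from fun a => PySem.Int.floordiv_eq_ediv_of_pos (by norm_num),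
    show ∀ a : Int, PySem.Int.floordiv a 1 = a / 1 from fun a => PySem.Int.floordiv_eq_ediv_of_pos (by norm_num)]
  have h5 : hp % 5 = 0 ∨ hp % 5 = 1 ∨ hp % 5 = 2 ∨ hp % 5 = 3 ∨ hp % 5 = 4 := by omega
  rcases h5 with h | h | h | h | h <;> rw [h] <;>
    norm_num [PySem.List.pyGet?, PySem.List.pyIdx?, show ((1:Int).toNat) = 1 from rfl, show ((2:Int).toNat) = 2 from rfl,
      show ((3:Int).toNat) = 3 from rfl, show ((4:Int).toNat) = 4 from rfl] <;> omega
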